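-- pv_equiv track=rewrite | github.com/AKhilRaghav0/krypticTrack | data_collection/system_logger.py | _is_gui_app
-- ===== SOURCE A (Python) =====
-- def _is_gui_app(app_name: str, exe_path: str) -> bool:
--     """Check if process is likely a GUI application."""
--     # Filter out system processes, daemons, etc.
--     system_keywords = [
--         'systemd', 'kernel', 'dbus', 'gdm', 'pulseaudio', 'pipewire',
--         'gnome-shell', 'kde', 'xorg', 'wayland', 'compositor',
--         'ssh', 'bash', 'zsh', 'sh', 'python', 'node', 'npm',
--         'system', 'daemon', 'service'
--     ]
--
--     app_lower = app_name.lower()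
--     exe_lower = exe_path.lower() if exe_path else ''
--
--     # If it contains system keywords, it's probably not a user app
--     for keyword in system_keywords:
--         if keyword in app_lower or keyword in exe_lower:
--             return False
--
--     # If it's a common GUI app pattern, it's likely a GUI app
--     gui_patterns = [
--         'code', 'chrome', 'firefox', 'gimp', 'libreoffice', 'gedit',
--         'nautilus', 'dolphin', 'thunar', 'file', 'editor', 'browser',
--         'terminal', 'gnome-terminal', 'konsole', 'alacritty', 'kitty'
--     ]
--
--     for pattern in gui_patterns:
--         if pattern in app_lower or pattern in exe_lower:
--             return True
--
--     # Default: assume it's a GUI app if we can't determine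
--     return True
-- ===== SOURCE B (Python) =====
-- # B: single pass over each lowered string; at each position only the system
-- # keywords starting with that character (precomputed index by first letter)
-- # are checked with str.startswith.  The dead gui_patterns loop of A is gone.
-- _KW_BY_FIRST = {
--     's': ('systemd', 'ssh', 'sh', 'system', 'service'),
--     'k': ('kernel', 'kde'),
--     'd': ('dbus', 'daemon'),
--     'g': ('gdm', 'gnome-shell'),
--     'p': ('pulseaudio', 'pipewire', 'python'),
--     'x': ('xorg',),
--     'w': ('wayland',),
--     'c': ('compositor',),
--     'b': ('bash',),
--     'z': ('zsh',),
--     'n': ('node', 'npm'),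
-- }
--
--
-- def _scan(s):
--     for i, c in enumerate(s):
--         for k in _KW_BY_FIRST.get(c, ()):
--             if s.startswith(k, i):
--                 return True
--     return False
--
--
-- def _is_gui_app(app_name: str, exe_path: str) -> bool:
--     app = app_name.lower()
--     exe = exe_path.lower() if exe_path else ''
--     return not (_scan(app) or _scan(exe))
-- ===== Notes on version B (the rewrite author's own statement) =====
-- stated objective: alternative
-- what changed: Replaced A's keyword-major scan (20 substring searches per call, plus a dead gui_patterns loop whose every outcome is True) by a text-major single pass: walk each lowered string once and, at each position, test only the system keywords indexed by their first character in a precomputed dict via str.startswith.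
import Mathlib
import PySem

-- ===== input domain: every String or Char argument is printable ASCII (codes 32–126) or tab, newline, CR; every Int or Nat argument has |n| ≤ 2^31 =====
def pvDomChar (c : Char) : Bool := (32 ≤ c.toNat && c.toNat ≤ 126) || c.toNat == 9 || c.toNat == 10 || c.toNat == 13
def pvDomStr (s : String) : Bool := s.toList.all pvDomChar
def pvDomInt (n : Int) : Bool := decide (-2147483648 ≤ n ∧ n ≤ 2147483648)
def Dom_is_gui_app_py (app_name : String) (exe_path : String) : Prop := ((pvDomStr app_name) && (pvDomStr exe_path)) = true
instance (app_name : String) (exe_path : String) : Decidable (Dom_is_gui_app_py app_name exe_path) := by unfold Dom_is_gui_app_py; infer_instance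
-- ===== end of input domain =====

-- B replaces A's keyword-major substring loop (and A's dead gui_patterns loop) by a
-- text-major single pass: at each position of each lowered string, only the system
-- keywords indexed by their first character (a precomputed dict) are tested.


-- ===== PORT A =====
def pvSystemKeywords : List String :=
  ["systemd", "kernel", "dbus", "gdm", "pulseaudio", "pipewire",
   "gnome-shell", "kde", "xorg", "wayland", "compositor",
   "ssh", "bash", "zsh", "sh", "python", "node", "npm",
   "system", "daemon", "service"]

def pvGuiPatterns : List String :=
  ["code", "chrome", "firefox", "gimp", "libreoffice", "gedit",
   "nautilus", "dolphin", "thunar", "file", "editor", "browser",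
   "terminal", "gnome-terminal", "konsole", "alacritty", "kitty"]

def is_gui_app_py (app_name : String) (exe_path : String) : Bool :=
  let appLower := PySem.Str.lower app_name
  -- `exe_path.lower() if exe_path else ''` (string truthiness = nonempty)
  let exeLower := if exe_path ≠ "" then PySem.Str.lower exe_path else ""
  -- `for keyword in system_keywords: if keyword in … : return False` (early return)
  if pvSystemKeywords.any (fun k => PySem.Str.isIn k appLower || PySem.Str.isIn k exeLower) then
    false
  else if pvGuiPatterns.any (fun p => PySem.Str.isIn p appLower || PySem.Str.isIn p exeLower) then
    true
  else
    true

-- ===== PORT B =====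
-- the module-level dict literal _KW_BY_FIRST of Source B
def pvKwByFirst : PySem.Dict Char (List String) := PySem.Dict.ofList
  [('s', ["systemd", "ssh", "sh", "system", "service"]),
   ('k', ["kernel", "kde"]),
   ('d', ["dbus", "daemon"]),
   ('g', ["gdm", "gnome-shell"]),
   ('p', ["pulseaudio", "pipewire", "python"]),
   ('x', ["xorg"]),
   ('w', ["wayland"]),
   ('c', ["compositor"]),
   ('b', ["bash"]),
   ('z', ["zsh"]),
   ('n', ["node", "npm"])]

-- Source B's _scan: `for i, c in enumerate(s): for k in dict.get(c, ()): if s.startswith(k, i): return True`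
-- `s.startswith(k, i)` = startswith (s.drop i) k — exact, since enumerate's indices satisfy 0 ≤ i ≤ len(s)
def pvScan (s : List Char) : Bool :=
  (PySem.List.enumerate s).any fun ic =>
    (pvKwByFirst.getD ic.2 []).any fun k =>
      PySem.Chars.startswith (s.drop ic.1.toNat) k.toList

def is_gui_app_py_alt (app_name : String) (exe_path : String) : Bool :=
  let app := (PySem.Str.lower app_name).toList
  let exe := if exe_path ≠ "" then (PySem.Str.lower exe_path).toList else []
  !(pvScan app || pvScan exe)

-- ===== PRECONDITION & SPEC =====
def Spec_is_gui_app_py (app_name : String) (exe_path : String) (out : Bool) : Prop := out = is_gui_app_py_alt app_name exe_path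
instance (app_name : String) (exe_path : String) (out : Bool) : Decidable (Spec_is_gui_app_py app_name exe_path out) := by unfold Spec_is_gui_app_py; infer_instance

-- ===== CLAIM (what is proved, stated in full; the proofs are below) =====
def Claim_equal_is_gui_app_py : Prop := ∀ (app_name : String) (exe_path : String), Dom_is_gui_app_py app_name exe_path → Spec_is_gui_app_py app_name exe_path (is_gui_app_py app_name exe_path)

-- ===== LEMMAS AND PROOFS =====
lemma pv_bucket_sub (c : Char) (k : String) (hk : k ∈ pvKwByFirst.getD c []) :
    k ∈ pvSystemKeywords := by
  by_cases hc : (['s','k','d','g','p','x','w','c','b','z','n'] : List Char).contains c = true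
  · simp only [List.contains_eq_mem, decide_eq_true_eq, List.mem_cons, List.not_mem_nil, or_false] at hc
    rcases hc with rfl|rfl|rfl|rfl|rfl|rfl|rfl|rfl|rfl|rfl|rfl <;>
      [ rw [show pvKwByFirst.getD 's' [] = ["systemd", "ssh", "sh", "system", "service"] from by decide] at hk;
        rw [show pvKwByFirst.getD 'k' [] = ["kernel", "kde"] from by decide] at hk;
        rw [show pvKwByFirst.getD 'd' [] = ["dbus", "daemon"] from by decide] at hk;
        rw [show pvKwByFirst.getD 'g' [] = ["gdm", "gnome-shell"] from by decide] at hk;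
        rw [show pvKwByFirst.getD 'p' [] = ["pulseaudio", "pipewire", "python"] from by decide] at hk;
        rw [show pvKwByFirst.getD 'x' [] = ["xorg"] from by decide] at hk;
        rw [show pvKwByFirst.getD 'w' [] = ["wayland"] from by decide] at hk;
        rw [show pvKwByFirst.getD 'c' [] = ["compositor"] from by decide] at hk;
        rw [show pvKwByFirst.getD 'b' [] = ["bash"] from by decide] at hk;
        rw [show pvKwByFirst.getD 'z' [] = ["zsh"] from by decide] at hk;
        rw [show pvKwByFirst.getD 'n' [] = ["node", "npm"] from by decide] at hk ] <;>
      fin_cases hk <;> decide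
  · have : pvKwByFirst.getD c [] = [] := by
      apply PySem.Dict.getD_of_not_contains
      simp only [List.contains_eq_mem, decide_eq_true_eq, List.mem_cons, List.not_mem_nil, or_false, not_or] at hc
      simp [pvKwByFirst, PySem.Dict.ofList, PySem.Dict.update, PySem.Dict.contains_insert, hc]
    rw [this] at hk; simp at hk
lemma pv_kw_bucket : ∀ k ∈ pvSystemKeywords,
    k.toList ≠ [] ∧ k ∈ pvKwByFirst.getD (k.toList.headD ' ') [] := by
  decide

lemma pv_scan_eq (s : List Char) :
    pvScan s = pvSystemKeywords.any (fun k => PySem.Chars.isIn k.toList s) := by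
  rw [Bool.eq_iff_iff]
  simp only [pvScan, List.any_eq_true]
  constructor
  · rintro ⟨ic, hmem, k, hk, hsw⟩
    rw [PySem.List.mem_enumerate_iff] at hmem
    obtain ⟨i, hi, rfl⟩ := hmem
    refine ⟨k, pv_bucket_sub _ _ hk, ?_⟩
    rw [← PySem.Chars.exists_prefix_drop_iff_isIn]
    refine ⟨i, (PySem.Chars.startswith_iff _ _).1 ?_⟩
    simpa using hsw
  · rintro ⟨k, hkmem, hin⟩
    obtain ⟨hne, hb⟩ := pv_kw_bucket k hkmem
    obtain ⟨j, hpre⟩ := (PySem.Chars.exists_prefix_drop_iff_isIn k.toList s).2 hin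
    obtain ⟨h, t, hkt⟩ := List.exists_cons_of_ne_nil hne
    have hdrop : s.drop j ≠ [] := by
      intro h0; rw [h0, hkt] at hpre; exact (List.cons_ne_nil _ _) (List.prefix_nil.1 hpre)
    have hj : j < s.length := by
      by_contra hge
      exact hdrop (List.drop_eq_nil_of_le (le_of_not_gt hge))
    have hhead : (s.drop j).head? = some h := by
      rw [hkt] at hpre
      obtain ⟨r, hr⟩ := hpre
      rw [← hr]; rfl
    have hsj : s[j] = h := by
      have h2 := List.head?_drop (l := s) (i := j)
      rw [hhead] at h2
      have h3 : s[j]? = some h := h2.symm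
      rw [List.getElem?_eq_getElem hj] at h3
      exact Option.some.inj h3
    refine ⟨((j : Int), s[j]), ?_, k, ?_, ?_⟩
    · rw [PySem.List.mem_enumerate_iff]
      exact ⟨j, hj, by simp⟩
    · rw [hsj]
      have hh : k.toList.headD ' ' = h := by rw [hkt]; rfl
      rwa [hh] at hb
    · simp only [Int.toNat_natCast]
      exact (PySem.Chars.startswith_iff _ _).2 hpre
lemma pv_if_not (c : Bool) : (if c = true then false else true) = !c := by
  cases c <;> rfl

lemma pv_any_or {α : Type} (l : List α) (p q : α → Bool) :
    (l.any fun x => p x || q x) = (l.any p || l.any q) := by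
  induction l with
  | nil => simp
  | cons x xs ih => simp only [List.any_cons, ih]; cases p x <;> cases q x <;> simp

theorem pv_main (a e : String) : is_gui_app_py a e = is_gui_app_py_alt a e := by
  have hlower : PySem.Str.lower "" = "" := by decide
  have hE : (if e ≠ "" then PySem.Str.lower e else "") = PySem.Str.lower e := by
    by_cases he : e = "" <;> simp [he, hlower]
  have hE' : (if e ≠ "" then (PySem.Str.lower e).toList else []) = (PySem.Str.lower e).toList := by
    by_cases he : e = "" <;> simp [he, hlower]
  simp only [is_gui_app_py, is_gui_app_py_alt, ite_self, hE, hE', pv_scan_eq]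
  rw [pv_any_or]
  simp only [PySem.Str.isIn_eq]
  exact pv_if_not _

-- ===== VERDICT (by name: the statement is the Claim_ definition above) =====
theorem is_gui_app_py_spec : Claim_equal_is_gui_app_py := by
  intro a e _
  unfold Spec_is_gui_app_py
  exact pv_main a e
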